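-- pv_equiv track=rewrite | github.com/akikuno/cstag | src/cstag/call.py | trim_clips
-- ===== SOURCE A (Python) =====
-- def _split_cigar(cigar: str) -> list[tuple[str, int]]:
--     parsed_cigar = []
--     start_idx = 0
--     for idx, operation in enumerate(cigar):
--         if operation.isdigit():
--             continue
--         length = int(cigar[start_idx:idx])
--         parsed_cigar.append((operation, length))
--         start_idx = idx + 1
--     return parsed_cigar
--
-- def _join_cigar(cigar_tuples: list[tuple[str, int]]) -> str:
--     return "".join(f"{length}{operation}" for operation, length in cigar_tuples)
--
-- def trim_clips(cigar: str, seq: str) -> tuple[str, str]: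
--     if all(x not in cigar for x in "SH"):
--         return cigar, seq
--     cigar_split = _split_cigar(cigar)
--     # trim soft clips of cigar and seq
--     if cigar_split[0][0] == "S":
--         length_softclip = cigar_split[0][1]
--         seq = seq[length_softclip:]
--         cigar_split = cigar_split[1:]
--     if cigar_split[-1][0] == "S":
--         length_softclip = cigar_split[-1][1]
--         seq = seq[:-length_softclip]
--         cigar_split = cigar_split[:-1]
--     # trim hard clips of cigar
--     if cigar_split[0][0] == "H":
--         cigar_split = cigar_split[1:]
--     if cigar_split[-1][0] == "H":
--         cigar_split = cigar_split[:-1]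
--     cigar = _join_cigar(cigar_split)
--     return cigar, seq
-- ===== SOURCE B (Python) =====
-- def _lead_digits(s: str) -> int:
--     i = 0
--     while i < len(s) and s[i].isdigit():
--         i += 1
--     return i
--
--
-- def _trail_digits(s: str) -> int:
--     k = len(s)
--     while k > 0 and s[k - 1].isdigit():
--         k -= 1
--     return len(s) - k
--
--
-- def trim_clips(cigar: str, seq: str) -> tuple[str, str]:
--     if 'S' not in cigar and 'H' not in cigar:
--         return cigar, seq
--     # leading soft clip: digit run then 'S' at the front of the raw string
--     i = _lead_digits(cigar)
--     if 0 < i and i < len(cigar) and cigar[i] == 'S':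
--         seq = seq[int(cigar[:i]):]
--         cigar = cigar[i + 1:]
--     # trailing soft clip: 'S' at the very end, digit run just before it
--     if cigar.endswith('S'):
--         t = _trail_digits(cigar[:-1])
--         if t > 0:
--             seq = seq[:-int(cigar[len(cigar) - 1 - t:len(cigar) - 1])]
--             cigar = cigar[:len(cigar) - 1 - t]
--     # leading hard clip
--     i = _lead_digits(cigar)
--     if 0 < i and i < len(cigar) and cigar[i] == 'H':
--         cigar = cigar[i + 1:]
--     # trailing hard clip
--     if cigar.endswith('H'):
--         t = _trail_digits(cigar[:-1])
--         if t > 0: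
--             cigar = cigar[:len(cigar) - 1 - t]
--     return cigar, seq
-- ===== Notes on version B (the rewrite author's own statement) =====
-- stated objective: alternative
-- what changed: Instead of tokenizing the whole CIGAR into an (op,length) list and rebuilding it with join(f"{length}{op}"), B returns early when no 'S'/'H' occurs and otherwise trims the clips by boundary string surgery on the raw string: digit-run scans at the two ends plus slicing, never parsing or reprinting the middle operations.
-- outside the precondition, e.g. on trim_clips('3M5S7', 'ABCDEFGHI'): A returns ('3M', 'ABCD'), B returns ('3M5S7', 'ABCDEFGHI'); on trim_clips('07M2S', 'ABCDEFG'): A returns ('7M', 'ABCDE'), B returns ('07M', 'ABCDE')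
import Mathlib
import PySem

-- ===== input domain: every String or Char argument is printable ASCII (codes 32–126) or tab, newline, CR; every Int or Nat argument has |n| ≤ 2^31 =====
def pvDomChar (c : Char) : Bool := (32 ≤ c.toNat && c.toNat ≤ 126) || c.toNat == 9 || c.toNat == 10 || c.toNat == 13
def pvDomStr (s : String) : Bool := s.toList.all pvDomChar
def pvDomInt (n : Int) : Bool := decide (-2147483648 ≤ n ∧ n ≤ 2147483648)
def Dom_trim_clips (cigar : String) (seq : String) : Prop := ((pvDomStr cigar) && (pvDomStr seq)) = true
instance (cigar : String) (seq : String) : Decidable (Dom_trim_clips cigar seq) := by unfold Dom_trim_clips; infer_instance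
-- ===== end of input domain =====

-- B trims the clips by boundary string surgery on the raw CIGAR (digit-run scans at the two ends)
-- instead of A's tokenize-everything-and-rebuild; objective: alternative. Return value only; no mutation.

-- ===== PORT A =====
-- _split_cigar's loop over enumerate(cigar): state = (start_idx, parsed_cigar); int() ValueError = none
def splitLoopA : List (Int × Char) → List Char → Int → List (Char × Int) → Option (List (Char × Int))
  | [], _, _, acc => some acc
  | (idx, op) :: rest, cs, start, acc =>
    if PySem.Chars.isdigit op then splitLoopA rest cs start acc
    else
      match PySem.Int.ofChars? (PySem.List.slice cs (some start) (some idx)) with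
      | none => none
      | some len => splitLoopA rest cs (idx + 1) (acc ++ [(op, len)])

def splitCigarA (cs : List Char) : Option (List (Char × Int)) :=
  splitLoopA (PySem.List.enumerate cs 0) cs 0 []

-- "".join(f"{length}{operation}" …)
def joinCigarA (l : List (Char × Int)) : List Char :=
  (l.map fun p => PySem.Int.toChars p.2 ++ [p.1]).flatten

def trim_clips (cigar : String) (seq : String) : String × String :=
  -- all(x not in cigar for x in "SH")
  if !(PySem.Chars.isIn ['S'] cigar.toList) && !(PySem.Chars.isIn ['H'] cigar.toList) then (cigar, seq)
  else
    match splitCigarA cigar.toList with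
    | none => ("", "")      -- int('') ValueError; outside Pre_
    | some l0 =>
      match PySem.List.pyGet? l0 0 with          -- cigar_split[0]; none = IndexError, outside Pre_
      | none => ("", "")
      | some t0 =>
        let l1 := if t0.1 = 'S' then PySem.List.slice l0 (some 1) none else l0
        let s1 := if t0.1 = 'S' then PySem.List.slice seq.toList (some t0.2) none else seq.toList
        match PySem.List.pyGet? l1 (-1) with     -- cigar_split[-1]
        | none => ("", "")
        | some t1 =>
          let l2 := if t1.1 = 'S' then PySem.List.slice l1 none (some (-1)) else l1
          let s2 := if t1.1 = 'S' then PySem.List.slice s1 none (some (-t1.2)) else s1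
          match PySem.List.pyGet? l2 0 with
          | none => ("", "")
          | some t2 =>
            let l3 := if t2.1 = 'H' then PySem.List.slice l2 (some 1) none else l2
            match PySem.List.pyGet? l3 (-1) with
            | none => ("", "")
            | some t3 =>
              let l4 := if t3.1 = 'H' then PySem.List.slice l3 none (some (-1)) else l3
              (String.ofList (joinCigarA l4), String.ofList s2)

-- ===== PORT B =====
-- _lead_digits's while loop: length of the maximal leading digit run
def leadDigitsB : List Char → Nat
  | [] => 0
  | c :: r => if PySem.Chars.isdigit c then leadDigitsB r + 1 else 0

-- _trail_digits's while loop scans digits from the right end: maximal digit suffix (exact)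
def trailDigitsB (cs : List Char) : Nat := leadDigitsB cs.reverse

def trim_clips_alt (cigar : String) (seq : String) : String × String :=
  -- 'S' not in cigar and 'H' not in cigar
  if !(PySem.Chars.isIn ['S'] cigar.toList) && !(PySem.Chars.isIn ['H'] cigar.toList) then (cigar, seq)
  else
    let cs0 := cigar.toList
    let sq0 := seq.toList
    -- leading soft clip: 0 < i and i < len(cigar) and cigar[i] == 'S'  (pyGet? = some merges the two)
    let i0 := leadDigitsB cs0
    let cs1 := if 0 < i0 ∧ PySem.List.pyGet? cs0 (i0 : Int) = some 'S' then
        PySem.List.slice cs0 (some ((i0 : Int) + 1)) none else cs0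
    -- int(cigar[:i]) on a nonempty digit run never raises; .getD 0 is unreachable
    let sq1 := if 0 < i0 ∧ PySem.List.pyGet? cs0 (i0 : Int) = some 'S' then
        PySem.List.slice sq0 (some ((PySem.Int.ofChars? (PySem.List.slice cs0 none (some (i0 : Int)))).getD 0)) none
      else sq0
    -- trailing soft clip: 'S' at the very end, digit run just before it
    let t1 := trailDigitsB (PySem.List.slice cs1 none (some (-1)))
    let cs2 := if PySem.Chars.endswith cs1 ['S'] ∧ 0 < t1 then
        PySem.List.slice cs1 none (some ((cs1.length : Int) - 1 - (t1 : Int))) else cs1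
    let sq2 := if PySem.Chars.endswith cs1 ['S'] ∧ 0 < t1 then
        PySem.List.slice sq1 none
          (some (-((PySem.Int.ofChars? (PySem.List.slice cs1 (some ((cs1.length : Int) - 1 - (t1 : Int))) (some ((cs1.length : Int) - 1)))).getD 0)))
      else sq1
    -- leading hard clip
    let i2 := leadDigitsB cs2
    let cs3 := if 0 < i2 ∧ PySem.List.pyGet? cs2 (i2 : Int) = some 'H' then
        PySem.List.slice cs2 (some ((i2 : Int) + 1)) none else cs2
    -- trailing hard clip
    let t3 := trailDigitsB (PySem.List.slice cs3 none (some (-1)))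
    let cs4 := if PySem.Chars.endswith cs3 ['H'] ∧ 0 < t3 then
        PySem.List.slice cs3 none (some ((cs3.length : Int) - 1 - (t3 : Int))) else cs3
    (String.ofList cs4, String.ofList sq2)

-- ===== PRECONDITION & SPEC =====
-- decompose a CIGAR into (digit-run, operation) chunks; none = some operation has no length digits
-- before it, or digits trail the last operation (acc carries the digit run being read)
def chunksGo : List Char → List Char → Option (List (List Char × Char))
  | [], acc => if acc.isEmpty then some [] else none
  | c :: r, acc =>
    if PySem.Chars.isdigit c then chunksGo r (acc ++ [c])
    else if acc.isEmpty then none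
    else (chunksGo r []).map ((acc, c) :: ·)

def chunksOf? (cs : List Char) : Option (List (List Char × Char)) := chunksGo cs []

-- a length field that round-trips through int()/str() (i.e. a plain decimal, no leading zeros)
def goodChunk (d : List Char) : Bool := (PySem.Int.ofChars? d).map PySem.Int.toChars == some d

-- the clip-only operation sequences on which A hits cigar_split[0]/[-1] of an empty list (IndexError)
def badOps : List (List Char) := [['S'], ['H'], ['S', 'S'], ['S', 'H'], ['H', 'S'], ['S', 'H', 'S']]

def preB (cigar : String) : Bool :=
  (!(PySem.Chars.isIn ['S'] cigar.toList) && !(PySem.Chars.isIn ['H'] cigar.toList)) ||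
    match chunksOf? cigar.toList with
    | none => false
    | some ch => ch.all (fun p => goodChunk p.1) && !(badOps.contains (ch.map Prod.snd))

-- Pre_ excludes cigars containing 'S'/'H' that are not well-formed CIGAR strings — on most of those A
-- raises ValueError (int('')) or IndexError (clip-only CIGARs), and on the rest (trailing garbage
-- digits, leading-zero length fields) A's tokenize-and-reprint silently canonicalizes the malformed
-- string, an accident of its implementation.
def Pre_trim_clips (cigar : String) (seq : String) : Prop := preB cigar = true

instance (cigar : String) (seq : String) : Decidable (Pre_trim_clips cigar seq) := by
  unfold Pre_trim_clips; infer_instance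

def pvWitness_trim_clips : String × String := ("2S3M1H", "ABCDEF")

def Spec_trim_clips (cigar : String) (seq : String) (out : String × String) : Prop :=
  out = trim_clips_alt cigar seq
instance (cigar : String) (seq : String) (out : String × String) : Decidable (Spec_trim_clips cigar seq out) := by
  unfold Spec_trim_clips; infer_instance

-- ===== CLAIM (what is proved, stated in full; the proofs are below) =====
def Claim_equal_trim_clips : Prop := ∀ (cigar : String) (seq : String), Dom_trim_clips cigar seq → Pre_trim_clips cigar seq → Spec_trim_clips cigar seq (trim_clips cigar seq)

-- ===== LEMMAS AND PROOFS =====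

-- proof-side vocabulary: chunk lists, their rendering, well-formedness, token values
def render (ch : List (List Char × Char)) : List Char := (ch.map fun p => p.1 ++ [p.2]).flatten

def WFC (ch : List (List Char × Char)) : Prop :=
  ∀ p ∈ ch, p.1 ≠ [] ∧ (∀ c ∈ p.1, PySem.Chars.isdigit c = true) ∧ PySem.Chars.isdigit p.2 = false

def GoodC (ch : List (List Char × Char)) : Prop := ∀ p ∈ ch, goodChunk p.1 = true

def chunkVal (d : List Char) : Int := (PySem.Int.ofChars? d).getD 0

def tokens (ch : List (List Char × Char)) : List (Char × Int) :=
  ch.map fun p => (p.2, chunkVal p.1)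

-- the chunk-level pipeline both branch-2 computations implement; none = A's IndexError
def cpipe (ch : List (List Char × Char)) (sq : List Char) :
    Option (List (List Char × Char) × List Char) :=
  match ch.head? with
  | none => none
  | some t0 =>
    let ch1 := if t0.2 = 'S' then ch.tail else ch
    let sq1 := if t0.2 = 'S' then PySem.List.slice sq (some (chunkVal t0.1)) none else sq
    match ch1.getLast? with
    | none => none
    | some t1 =>
      let ch2 := if t1.2 = 'S' then ch1.dropLast else ch1
      let sq2 := if t1.2 = 'S' then PySem.List.slice sq1 none (some (-(chunkVal t1.1))) else sq1
      match ch2.head? with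
      | none => none
      | some t2 =>
        let ch3 := if t2.2 = 'H' then ch2.tail else ch2
        match ch3.getLast? with
        | none => none
        | some t3 => some (if t3.2 = 'H' then ch3.dropLast else ch3, sq2)

lemma isIn_singleton_iff (a : Char) (l : List Char) : PySem.Chars.isIn [a] l = true ↔ a ∈ l := by
  simp [pysem]; exact List.singleton_infix_iff a l

lemma pyGet?_neg_one {α : Type} (l : List α) : PySem.List.pyGet? l (-1) = l.getLast? := by
  simp [PySem.List.pyGet?, PySem.List.pyIdx?]
  cases l <;> simp [List.getLast?_eq_getElem?]

lemma pyGet?_zero {α : Type} (l : List α) : PySem.List.pyGet? l 0 = l.head? := by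
  cases l <;> simp [PySem.List.pyGet?, PySem.List.pyIdx?]

lemma goodChunk_spec {d : List Char} (h : goodChunk d = true) :
    PySem.Int.ofChars? d = some (chunkVal d) ∧ PySem.Int.toChars (chunkVal d) = d := by
  unfold goodChunk at h
  rw [beq_iff_eq] at h
  cases hv : PySem.Int.ofChars? d with
  | none => rw [hv] at h; simp at h
  | some n =>
    rw [hv] at h
    simp only [Option.map_some, Option.some_inj] at h
    exact ⟨by simp [chunkVal, hv], by simp [chunkVal, hv, h]⟩

lemma render_cons (d : List Char) (op : Char) (ch : List (List Char × Char)) :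
    render ((d, op) :: ch) = d ++ op :: render ch := by simp [render]

lemma render_concat (ch : List (List Char × Char)) (d : List Char) (op : Char) :
    render (ch ++ [(d, op)]) = render ch ++ d ++ [op] := by simp [render]

lemma chunksGo_sound : ∀ (cs acc : List Char) (ch : List (List Char × Char)),
    (∀ c ∈ acc, PySem.Chars.isdigit c = true) → chunksGo cs acc = some ch →
    acc ++ cs = render ch ∧ WFC ch := by
  intro cs
  induction cs with
  | nil =>
    intro acc ch hacc h
    rcases acc with _ | ⟨a, acc'⟩
    · simp only [chunksGo, List.isEmpty_nil, if_pos] at h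
      rw [Option.some_inj] at h
      subst h
      exact ⟨by simp [render], by intro p hp; simp at hp⟩
    · simp [chunksGo] at h
  | cons c r ih =>
    intro acc ch hacc h
    rw [chunksGo] at h
    by_cases hd : PySem.Chars.isdigit c = true
    · rw [if_pos hd] at h
      obtain ⟨h1, h2⟩ := ih (acc ++ [c]) ch (by
        intro x hx
        rcases List.mem_append.mp hx with hx' | hx'
        · exact hacc x hx'
        · simpa using (by simpa using hx') ▸ hd) h
      exact ⟨by simpa using h1, h2⟩
    · rw [if_neg hd] at h
      rcases acc with _ | ⟨a, acc'⟩
      · simp at h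
      · simp only [List.isEmpty_cons, Bool.false_eq_true, if_false] at h
        rw [Option.map_eq_some_iff] at h
        obtain ⟨ch', hch', rfl⟩ := h
        obtain ⟨h1, h2⟩ := ih [] ch' (by simp) hch'
        simp only [List.nil_append] at h1
        constructor
        · rw [render_cons, ← h1]
        · intro p hp
          rcases List.mem_cons.mp hp with rfl | hp'
          · exact ⟨by simp, hacc, by simpa using hd⟩
          · exact h2 p hp'

lemma chunksOf?_sound {cs : List Char} {ch : List (List Char × Char)}
    (h : chunksOf? cs = some ch) : cs = render ch ∧ WFC ch := by
  have := chunksGo_sound cs [] ch (by simp) h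
  simpa using this

lemma splitLoopA_skip (d : List Char) (hall : ∀ c ∈ d, PySem.Chars.isdigit c = true) :
    ∀ (p : Int) (tail : List (Int × Char)) (cs : List Char) (start : Int) (acc : List (Char × Int)),
    splitLoopA (PySem.List.enumerate d p ++ tail) cs start acc = splitLoopA tail cs start acc := by
  induction d with
  | nil => intro p tail cs start acc; simp [PySem.List.enumerate]
  | cons c r ih =>
    intro p tail cs start acc
    rw [PySem.List.enumerate_cons, List.cons_append, splitLoopA,
        if_pos (hall c List.mem_cons_self)]
    exact ih (fun x hx => hall x (List.mem_cons_of_mem _ hx)) _ _ _ _ _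

lemma splitLoopA_main :
    ∀ (ch : List (List Char × Char)) (pre : List Char) (acc : List (Char × Int)),
      WFC ch → GoodC ch →
      splitLoopA (PySem.List.enumerate (render ch) (pre.length : Int)) (pre ++ render ch)
          ((pre.length : Int)) acc = some (acc ++ tokens ch) := by
  intro ch
  induction ch with
  | nil => intro pre acc _ _; simp [render, tokens, splitLoopA]
  | cons t ch' ih =>
    intro pre acc hwf hg
    obtain ⟨d, op⟩ := t
    obtain ⟨hdne, hdall, hopnd⟩ := hwf (d, op) List.mem_cons_self
    rw [render_cons, PySem.List.enumerate_append, PySem.List.enumerate_cons,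
        splitLoopA_skip d hdall]
    rw [show splitLoopA (((pre.length : Int) + (d.length : Int), op) ::
          PySem.List.enumerate (render ch') ((pre.length : Int) + (d.length : Int) + 1))
          (pre ++ (d ++ op :: render ch')) ((pre.length : Int)) acc =
        (if PySem.Chars.isdigit op then
            splitLoopA (PySem.List.enumerate (render ch') ((pre.length : Int) + (d.length : Int) + 1))
              (pre ++ (d ++ op :: render ch')) ((pre.length : Int)) acc
          else
            match PySem.Int.ofChars? (PySem.List.slice (pre ++ (d ++ op :: render ch'))
                (some ((pre.length : Int))) (some ((pre.length : Int) + (d.length : Int)))) with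
            | none => none
            | some len =>
              splitLoopA (PySem.List.enumerate (render ch') ((pre.length : Int) + (d.length : Int) + 1))
                (pre ++ (d ++ op :: render ch')) ((pre.length : Int) + (d.length : Int) + 1)
                (acc ++ [(op, len)])) from rfl]
    rw [if_neg (by simpa using hopnd)]
    have hslice : PySem.List.slice (pre ++ (d ++ op :: render ch')) (some (pre.length : Int))
        (some ((pre.length : Int) + (d.length : Int))) = d := by
      rw [show ((pre.length : Int) + (d.length : Int)) = ((pre.length + d.length : Nat) : Int) by push_cast; ring]
      rw [PySem.List.slice_natCast, List.drop_left, Nat.add_sub_cancel_left]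
      rw [show d ++ op :: render ch' = d ++ (op :: render ch') from rfl, List.take_left]
    rw [hslice, (goodChunk_spec (hg (d, op) List.mem_cons_self)).1]
    have hlen : ((pre.length : Int) + (d.length : Int) + 1) = (((pre ++ d ++ [op]).length : Nat) : Int) := by
      simp; ring
    rw [show pre ++ (d ++ op :: render ch') = (pre ++ d ++ [op]) ++ render ch' by simp]
    rw [hlen]
    rw [show (match some (chunkVal (d, op).1) with
        | none => (none : Option (List (Char × Int)))
        | some len =>
          splitLoopA (PySem.List.enumerate (render ch') ((((pre ++ d ++ [op]).length : Nat)) : Int))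
            (pre ++ d ++ [op] ++ render ch') ((((pre ++ d ++ [op]).length : Nat)) : Int)
            (acc ++ [(op, len)])) =
        splitLoopA (PySem.List.enumerate (render ch') ((((pre ++ d ++ [op]).length : Nat)) : Int))
          (pre ++ d ++ [op] ++ render ch') ((((pre ++ d ++ [op]).length : Nat)) : Int)
          (acc ++ [(op, chunkVal (d, op).1)]) from rfl]
    rw [ih (pre ++ d ++ [op]) (acc ++ [(op, chunkVal d)])
      (fun p hp => hwf p (List.mem_cons_of_mem _ hp))
      (fun p hp => hg p (List.mem_cons_of_mem _ hp))]
    simp [tokens]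

lemma splitA_render {ch : List (List Char × Char)} (hwf : WFC ch) (hg : GoodC ch) :
    splitCigarA (render ch) = some (tokens ch) := by
  have h := splitLoopA_main ch [] [] hwf hg
  simpa [splitCigarA] using h

lemma joinA_tokens {ch : List (List Char × Char)} (hg : GoodC ch) :
    joinCigarA (tokens ch) = render ch := by
  induction ch with
  | nil => simp [joinCigarA, tokens, render]
  | cons t ch' ih =>
    obtain ⟨d, op⟩ := t
    have h2 := (goodChunk_spec (hg (d, op) List.mem_cons_self)).2
    simp only [joinCigarA, tokens, render, List.map_cons, List.flatten_cons] at *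
    rw [h2, ih (fun p hp => hg p (List.mem_cons_of_mem _ hp))]

lemma leadDigits_append (d : List Char) (hall : ∀ c ∈ d, PySem.Chars.isdigit c = true) :
    ∀ r : List Char, leadDigitsB (d ++ r) = d.length + leadDigitsB r := by
  induction d with
  | nil => simp
  | cons c x ih =>
    intro r
    rw [List.cons_append, leadDigitsB, if_pos (hall c List.mem_cons_self),
      ih (fun a ha => hall a (List.mem_cons_of_mem _ ha)) r]
    simp; omega

lemma leadDigits_all (d : List Char) (hall : ∀ c ∈ d, PySem.Chars.isdigit c = true) :
    leadDigitsB d = d.length := by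
  have h := leadDigits_append d hall []
  simpa [leadDigitsB] using h

lemma leadDigits_stop (d : List Char) (c : Char) (y : List Char)
    (hall : ∀ a ∈ d, PySem.Chars.isdigit a = true) (hc : PySem.Chars.isdigit c = false) :
    leadDigitsB (d ++ c :: y) = d.length := by
  rw [leadDigits_append d hall, leadDigitsB, if_neg (by simp [hc])]
  omega

lemma lead_len {d : List Char} {op : Char} {chT : List (List Char × Char)}
    (hall : ∀ a ∈ d, PySem.Chars.isdigit a = true) (hop : PySem.Chars.isdigit op = false) :
    leadDigitsB (render ((d, op) :: chT)) = d.length := by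
  rw [render_cons]; exact leadDigits_stop d op _ hall hop

lemma lead_get {d : List Char} (op : Char) (chT : List (List Char × Char)) :
    PySem.List.pyGet? (render ((d, op) :: chT)) ((d.length : Nat) : Int) = some op := by
  rw [render_cons]
  simp [pysem]

lemma lead_drop (d : List Char) (op : Char) (chT : List (List Char × Char)) :
    PySem.List.slice (render ((d, op) :: chT)) (some ((d.length : Int) + 1)) none = render chT := by
  rw [render_cons, show ((d.length : Int) + 1) = ((d.length + 1 : Nat) : Int) by push_cast; ring,
    PySem.List.slice_from_natCast]
  rw [show d ++ op :: render chT = (d ++ [op]) ++ render chT by simp,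
    show d.length + 1 = (d ++ [op]).length by simp, List.drop_left]

lemma lead_take (d : List Char) (op : Char) (chT : List (List Char × Char)) :
    PySem.List.slice (render ((d, op) :: chT)) none (some (d.length : Int)) = d := by
  rw [render_cons, PySem.List.slice_to_natCast,
    show d ++ op :: render chT = d ++ (op :: render chT) from rfl, List.take_left]

lemma endswith_concat (x : List Char) (c a : Char) :
    PySem.Chars.endswith (x ++ [c]) [a] = (a == c) := by
  rcases h : a == c with _ | _
  · rw [Bool.eq_false_iff]
    intro hc
    rw [PySem.Chars.endswith_iff] at hc
    obtain ⟨t, ht⟩ := hc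
    have := List.concat_inj.mp (by simpa using ht)
    simp [this.2] at h
  · rw [beq_iff_eq] at h; subst h
    rw [PySem.Chars.endswith_iff]
    exact ⟨x, rfl⟩

lemma trail_len {chI : List (List Char × Char)} {d : List Char}
    (hwf : WFC chI) (hall : ∀ a ∈ d, PySem.Chars.isdigit a = true) :
    trailDigitsB (render chI ++ d) = d.length := by
  unfold trailDigitsB
  rw [List.reverse_append]
  rcases List.eq_nil_or_concat' chI with rfl | ⟨chJ, ⟨d2, op2⟩, rfl⟩
  · simp [render, leadDigits_all d.reverse (by simpa using hall)]
  · rw [render_concat, List.reverse_append, List.reverse_append]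
    simp only [List.reverse_cons, List.reverse_nil, List.nil_append, List.cons_append]
    rw [leadDigits_stop d.reverse op2 _ (by simpa using hall)
      (hwf (d2, op2) (by simp)).2.2]
    simp

lemma trail_take (chI : List (List Char × Char)) (d : List Char) (op : Char) :
    PySem.List.slice (render (chI ++ [(d, op)])) none
      (some (((render (chI ++ [(d, op)])).length : Int) - 1 - (d.length : Int))) = render chI := by
  rw [render_concat]
  have hlen : (render chI ++ d ++ [op]).length = (render chI).length + d.length + 1 := by simp; omega
  rw [show (((render chI ++ d ++ [op]).length : Int) - 1 - (d.length : Int)) = (((render chI).length : Nat) : Int) by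
    rw [hlen]; push_cast; ring]
  rw [PySem.List.slice_to_natCast, List.append_assoc, List.take_left]

lemma trail_mid (chI : List (List Char × Char)) (d : List Char) (op : Char) :
    PySem.List.slice (render (chI ++ [(d, op)]))
      (some (((render (chI ++ [(d, op)])).length : Int) - 1 - (d.length : Int)))
      (some (((render (chI ++ [(d, op)])).length : Int) - 1)) = d := by
  rw [render_concat]
  have hlen : (render chI ++ d ++ [op]).length = (render chI).length + d.length + 1 := by simp; omega
  rw [show (((render chI ++ d ++ [op]).length : Int) - 1 - (d.length : Int)) = (((render chI).length : Nat) : Int) by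
    rw [hlen]; push_cast; ring]
  rw [show (((render chI ++ d ++ [op]).length : Int) - 1) = ((((render chI).length + d.length) : Nat) : Int) by
    rw [hlen]; push_cast; ring]
  rw [PySem.List.slice_natCast, List.append_assoc, List.drop_left, Nat.add_sub_cancel_left,
    List.take_left]

lemma trail_dropLast (chI : List (List Char × Char)) (d : List Char) (op : Char) :
    PySem.List.slice (render (chI ++ [(d, op)])) none (some (-1)) = render chI ++ d := by
  rw [render_concat, PySem.List.slice_to_neg_one, List.dropLast_concat]

-- stages 3 and 4 of cpipe succeed on any nonempty ch2 unless ch2 = [t] with t.2 = 'H'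
lemma stage34_isSome (ch2 : List (List Char × Char)) (sq2 : List Char) (hne : ch2 ≠ [])
    (hno : ∀ t, ch2 = [t] → t.2 ≠ 'H') :
    (match ch2.head? with
      | none => none
      | some t2 =>
        let ch3 := if t2.2 = 'H' then ch2.tail else ch2
        match ch3.getLast? with
        | none => none
        | some t3 => some (if t3.2 = 'H' then ch3.dropLast else ch3, sq2)).isSome := by
  obtain ⟨t2, tl, rfl⟩ : ∃ t2 tl, ch2 = t2 :: tl := by
    cases ch2 with
    | nil => exact absurd rfl hne
    | cons a b => exact ⟨a, b, rfl⟩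
  simp only [List.head?_cons]
  by_cases hH : t2.2 = 'H'
  · simp only [hH, reduceIte, List.tail_cons]
    rcases tl with _ | ⟨u, tl'⟩
    · exact absurd hH (hno t2 rfl)
    · obtain ⟨chI, t3, hdec⟩ := List.eq_nil_or_concat' (u :: tl') |>.resolve_left (by simp)
      rw [hdec, List.getLast?_concat]
      simp
  · simp only [if_neg hH]
    obtain ⟨chI, t3, hdec⟩ := List.eq_nil_or_concat' (t2 :: tl) |>.resolve_left (by simp)
    rw [hdec, List.getLast?_concat]
    simp

lemma cpipe_isSome (ch : List (List Char × Char)) (sq : List Char) (hne : ch ≠ [])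
    (hbad : badOps.contains (ch.map Prod.snd) = false) : (cpipe ch sq).isSome := by
  obtain ⟨t0, tl, rfl⟩ : ∃ t0 tl, ch = t0 :: tl := by
    cases ch with
    | nil => exact absurd rfl hne
    | cons a b => exact ⟨a, b, rfl⟩
  unfold cpipe
  simp only [List.head?_cons]
  by_cases hS0 : t0.2 = 'S'
  · simp only [hS0, reduceIte, List.tail_cons]
    rcases tl with _ | ⟨u, tl'⟩
    · simp [badOps, hS0] at hbad
    obtain ⟨chI, t1, hdec⟩ := List.eq_nil_or_concat' (u :: tl') |>.resolve_left (by simp)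
    rw [hdec, List.getLast?_concat]
    by_cases hS1 : t1.2 = 'S'
    · simp only [hS1, reduceIte, List.dropLast_concat]
      have hIne : chI ≠ [] := by
        rintro rfl
        simp only [List.nil_append] at hdec
        rcases List.cons_eq_cons.mp hdec with ⟨rfl, rfl⟩
        simp [badOps, hS0, hS1] at hbad
      refine stage34_isSome chI _ hIne ?_
      rintro t rfl
      intro hH
      rcases List.cons_eq_cons.mp (by simpa using hdec) with ⟨rfl, htl⟩
      rcases htl with rfl
      simp [badOps, hS0, hS1, hH] at hbad
    · simp only [if_neg hS1]
      refine stage34_isSome (chI ++ [t1]) _ (by simp) ?_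
      rintro t hEq hH
      have hone : chI = [] ∧ t1 = t := by
        rcases chI with _ | ⟨a, chI'⟩
        · simpa using hEq
        · have hl := congrArg List.length hEq
          simp at hl
      obtain ⟨rfl, rfl⟩ := hone
      simp only [List.nil_append] at hdec
      rcases List.cons_eq_cons.mp hdec with ⟨rfl, rfl⟩
      simp [badOps, hS0, hH] at hbad
  · simp only [if_neg hS0]
    obtain ⟨chI, t1, hdec⟩ := List.eq_nil_or_concat' (t0 :: tl) |>.resolve_left (by simp)
    rw [hdec, List.getLast?_concat]
    by_cases hS1 : t1.2 = 'S'
    · simp only [hS1, reduceIte, List.dropLast_concat]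
      have hIne : chI ≠ [] := by
        rintro rfl
        simp only [List.nil_append] at hdec
        rcases List.cons_eq_cons.mp hdec with ⟨rfl, rfl⟩
        exact hS0 hS1
      refine stage34_isSome chI _ hIne ?_
      rintro t rfl hH
      rcases List.cons_eq_cons.mp (by simpa using hdec) with ⟨rfl, htl⟩
      rcases htl with rfl
      simp [badOps, hH, hS1] at hbad
    · simp only [if_neg hS1]
      refine stage34_isSome (chI ++ [t1]) _ (by simp) ?_
      rintro t hEq hH
      have hone : chI = [] ∧ t1 = t := by
        rcases chI with _ | ⟨a, chI'⟩
        · simpa using hEq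
        · have hl := congrArg List.length hEq
          simp at hl
      obtain ⟨rfl, rfl⟩ := hone
      simp only [List.nil_append] at hdec
      rcases List.cons_eq_cons.mp hdec with ⟨rfl, rfl⟩
      simp [badOps, hH] at hbad

lemma tokens_tail (l : List (List Char × Char)) : (tokens l).tail = tokens l.tail := by
  simp [tokens, List.map_tail]
lemma tokens_dropLast (l : List (List Char × Char)) : (tokens l).dropLast = tokens l.dropLast := by
  simp [tokens, List.map_dropLast]

lemma A_branch2 {ch ch' : List (List Char × Char)} {sq sq' : List Char}
    (hwf : WFC ch) (hg : GoodC ch) (hp : cpipe ch sq = some (ch', sq')) (cigar seq : String)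
    (hcs : cigar.toList = render ch) (hsq : seq.toList = sq)
    (hsh : (!(PySem.Chars.isIn ['S'] cigar.toList) && !(PySem.Chars.isIn ['H'] cigar.toList)) = false) :
    trim_clips cigar seq = (String.ofList (render ch'), String.ofList sq') := by
  unfold trim_clips
  rw [if_neg (by simp [hsh]), hcs, hsq, splitA_render hwf hg]
  unfold cpipe at hp
  rcases hh0 : ch.head? with _ | t0
  · rw [hh0] at hp; cases hp
  rw [hh0] at hp
  simp only []
  rw [show PySem.List.pyGet? (tokens ch) 0 = some (t0.2, chunkVal t0.1) from by
    rw [pyGet?_zero, tokens, List.head?_map, hh0, Option.map_some]]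
  simp only []
  -- align step-1 state with cpipe's
  rw [PySem.List.slice_from_one, tokens_tail,
    show (if t0.2 = 'S' then tokens ch.tail else tokens ch) = tokens (if t0.2 = 'S' then ch.tail else ch) from (apply_ite tokens _ _ _).symm]
  simp only [] at hp
  rcases hL1 : (if t0.2 = 'S' then ch.tail else ch).getLast? with _ | t1
  · rw [hL1] at hp; cases hp
  rw [hL1] at hp
  rw [show PySem.List.pyGet? (tokens (if t0.2 = 'S' then ch.tail else ch)) (-1) = some (t1.2, chunkVal t1.1) from by
    rw [pyGet?_neg_one, tokens, List.getLast?_map, hL1, Option.map_some]]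
  simp only []
  -- align step-2 state
  rw [PySem.List.slice_to_neg_one, tokens_dropLast,
    show (if t1.2 = 'S' then tokens (if t0.2 = 'S' then ch.tail else ch).dropLast else tokens (if t0.2 = 'S' then ch.tail else ch)) = tokens (if t1.2 = 'S' then (if t0.2 = 'S' then ch.tail else ch).dropLast else (if t0.2 = 'S' then ch.tail else ch)) from (apply_ite tokens _ _ _).symm]
  simp only [] at hp
  rcases hH2 : (if t1.2 = 'S' then (if t0.2 = 'S' then ch.tail else ch).dropLast else (if t0.2 = 'S' then ch.tail else ch)).head? with _ | t2
  · rw [hH2] at hp; cases hp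
  rw [hH2] at hp
  rw [show PySem.List.pyGet? (tokens (if t1.2 = 'S' then (if t0.2 = 'S' then ch.tail else ch).dropLast else (if t0.2 = 'S' then ch.tail else ch))) 0 = some (t2.2, chunkVal t2.1) from by
    rw [pyGet?_zero, tokens, List.head?_map, hH2, Option.map_some]]
  simp only []
  rw [PySem.List.slice_from_one, tokens_tail,
    show (if t2.2 = 'H' then tokens (if t1.2 = 'S' then (if t0.2 = 'S' then ch.tail else ch).dropLast else (if t0.2 = 'S' then ch.tail else ch)).tail else tokens (if t1.2 = 'S' then (if t0.2 = 'S' then ch.tail else ch).dropLast else (if t0.2 = 'S' then ch.tail else ch))) = tokens (if t2.2 = 'H' then (if t1.2 = 'S' then (if t0.2 = 'S' then ch.tail else ch).dropLast else (if t0.2 = 'S' then ch.tail else ch)).tail else (if t1.2 = 'S' then (if t0.2 = 'S' then ch.tail else ch).dropLast else (if t0.2 = 'S' then ch.tail else ch))) from (apply_ite tokens _ _ _).symm]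
  simp only [] at hp
  rcases hL3 : (if t2.2 = 'H' then (if t1.2 = 'S' then (if t0.2 = 'S' then ch.tail else ch).dropLast else (if t0.2 = 'S' then ch.tail else ch)).tail else (if t1.2 = 'S' then (if t0.2 = 'S' then ch.tail else ch).dropLast else (if t0.2 = 'S' then ch.tail else ch))).getLast? with _ | t3
  · rw [hL3] at hp; cases hp
  rw [hL3] at hp
  rw [show PySem.List.pyGet? (tokens (if t2.2 = 'H' then (if t1.2 = 'S' then (if t0.2 = 'S' then ch.tail else ch).dropLast else (if t0.2 = 'S' then ch.tail else ch)).tail else (if t1.2 = 'S' then (if t0.2 = 'S' then ch.tail else ch).dropLast else (if t0.2 = 'S' then ch.tail else ch)))) (-1) = some (t3.2, chunkVal t3.1) from by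
    rw [pyGet?_neg_one, tokens, List.getLast?_map, hL3, Option.map_some]]
  simp only []
  rw [PySem.List.slice_to_neg_one, tokens_dropLast,
    show (if t3.2 = 'H' then tokens (if t2.2 = 'H' then (if t1.2 = 'S' then (if t0.2 = 'S' then ch.tail else ch).dropLast else (if t0.2 = 'S' then ch.tail else ch)).tail else (if t1.2 = 'S' then (if t0.2 = 'S' then ch.tail else ch).dropLast else (if t0.2 = 'S' then ch.tail else ch))).dropLast else tokens (if t2.2 = 'H' then (if t1.2 = 'S' then (if t0.2 = 'S' then ch.tail else ch).dropLast else (if t0.2 = 'S' then ch.tail else ch)).tail else (if t1.2 = 'S' then (if t0.2 = 'S' then ch.tail else ch).dropLast else (if t0.2 = 'S' then ch.tail else ch)))) = tokens (if t3.2 = 'H' then (if t2.2 = 'H' then (if t1.2 = 'S' then (if t0.2 = 'S' then ch.tail else ch).dropLast else (if t0.2 = 'S' then ch.tail else ch)).tail else (if t1.2 = 'S' then (if t0.2 = 'S' then ch.tail else ch).dropLast else (if t0.2 = 'S' then ch.tail else ch))).dropLast else (if t2.2 = 'H' then (if t1.2 = 'S' then (if t0.2 = 'S' then ch.tail else ch).dropLast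 else (if t0.2 = 'S' then ch.tail else ch)).tail else (if t1.2 = 'S' then (if t0.2 = 'S' then ch.tail else ch).dropLast else (if t0.2 = 'S' then ch.tail else ch)))) from (apply_ite tokens _ _ _).symm]
  injection hp with hp1
  injection hp1 with hpc hps
  have hsub : (if t3.2 = 'H' then (if t2.2 = 'H' then (if t1.2 = 'S' then (if t0.2 = 'S' then ch.tail else ch).dropLast else (if t0.2 = 'S' then ch.tail else ch)).tail else (if t1.2 = 'S' then (if t0.2 = 'S' then ch.tail else ch).dropLast else (if t0.2 = 'S' then ch.tail else ch))).dropLast else (if t2.2 = 'H' then (if t1.2 = 'S' then (if t0.2 = 'S' then ch.tail else ch).dropLast else (if t0.2 = 'S' then ch.tail else ch)).tail else (if t1.2 = 'S' then (if t0.2 = 'S' then ch.tail else ch).dropLast else (if t0.2 = 'S' then ch.tail else ch)))).Sublist ch := by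
    have s1 : (if t0.2 = 'S' then ch.tail else ch).Sublist ch := by
      split
      · exact List.tail_sublist _
      · exact List.Sublist.refl _
    have s2 : (if t1.2 = 'S' then (if t0.2 = 'S' then ch.tail else ch).dropLast else (if t0.2 = 'S' then ch.tail else ch)).Sublist (if t0.2 = 'S' then ch.tail else ch) := by
      split
      · exact List.dropLast_sublist _
      · exact List.Sublist.refl _
    have s3 : (if t2.2 = 'H' then (if t1.2 = 'S' then (if t0.2 = 'S' then ch.tail else ch).dropLast else (if t0.2 = 'S' then ch.tail else ch)).tail else (if t1.2 = 'S' then (if t0.2 = 'S' then ch.tail else ch).dropLast else (if t0.2 = 'S' then ch.tail else ch))).Sublist (if t1.2 = 'S' then (if t0.2 = 'S' then ch.tail else ch).dropLast else (if t0.2 = 'S' then ch.tail else ch)) := by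
      split
      · exact List.tail_sublist _
      · exact List.Sublist.refl _
    have s4 : (if t3.2 = 'H' then (if t2.2 = 'H' then (if t1.2 = 'S' then (if t0.2 = 'S' then ch.tail else ch).dropLast else (if t0.2 = 'S' then ch.tail else ch)).tail else (if t1.2 = 'S' then (if t0.2 = 'S' then ch.tail else ch).dropLast else (if t0.2 = 'S' then ch.tail else ch))).dropLast else (if t2.2 = 'H' then (if t1.2 = 'S' then (if t0.2 = 'S' then ch.tail else ch).dropLast else (if t0.2 = 'S' then ch.tail else ch)).tail else (if t1.2 = 'S' then (if t0.2 = 'S' then ch.tail else ch).dropLast else (if t0.2 = 'S' then ch.tail else ch)))).Sublist (if t2.2 = 'H' then (if t1.2 = 'S' then (if t0.2 = 'S' then ch.tail else ch).dropLast else (if t0.2 = 'S' then ch.tail else ch)).tail else (if t1.2 = 'S' then (if t0.2 = 'S' then ch.tail else ch).dropLast else (if t0.2 = 'S' then ch.tail else ch))) := by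
      split
      · exact List.dropLast_sublist _
      · exact List.Sublist.refl _
    exact ((s4.trans s3).trans s2).trans s1
  rw [joinA_tokens (fun p hpm => hg p (hsub.mem hpm))]
  rw [hpc, hps]

lemma WFC_sub {l l' : List (List Char × Char)} (h : l.Sublist l') (hw : WFC l') : WFC l :=
  fun p hp => hw p (h.mem hp)

lemma B_branch2 {ch ch' : List (List Char × Char)} {sq sq' : List Char}
    (hwf : WFC ch) (hg : GoodC ch) (hp : cpipe ch sq = some (ch', sq')) (cigar seq : String)
    (hcs : cigar.toList = render ch) (hsq : seq.toList = sq)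
    (hsh : (!(PySem.Chars.isIn ['S'] cigar.toList) && !(PySem.Chars.isIn ['H'] cigar.toList)) = false) :
    trim_clips_alt cigar seq = (String.ofList (render ch'), String.ofList sq') := by
  unfold trim_clips_alt
  rw [if_neg (by simp [hsh]), hcs, hsq]
  simp only []
  unfold cpipe at hp
  -- stage 1 : ch = (d0, op0) :: chT
  rcases hh0 : ch.head? with _ | t0
  · rw [hh0] at hp; cases hp
  rw [hh0] at hp
  simp only [] at hp
  obtain ⟨chT, rfl⟩ := List.head?_eq_some_iff.mp hh0
  obtain ⟨d0, op0⟩ := t0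
  obtain ⟨hd0ne, hd0dig, hop0nd⟩ := hwf (d0, op0) List.mem_cons_self
  rw [lead_len hd0dig hop0nd, lead_get op0 chT]
  have hc1 : (0 < d0.length ∧ (some op0 = some 'S')) ↔ (op0 = 'S') := by
    simp [List.length_pos_iff, hd0ne]
  rw [if_congr hc1 rfl rfl, if_congr hc1 rfl rfl,
      lead_drop d0 op0 chT, lead_take d0 op0 chT]
  rw [show (if op0 = 'S' then render chT else render ((d0, op0) :: chT)) =
      render (if op0 = 'S' then chT else ((d0, op0) :: chT)) from (apply_ite render _ _ _).symm]
  rw [List.tail_cons] at hp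
  -- stage 2 : E1 = chI ++ [(d1, op1)]
  rcases hL1 : (if op0 = 'S' then chT else ((d0, op0) :: chT)).getLast? with _ | t1
  · rw [hL1] at hp; cases hp
  rw [hL1] at hp
  simp only [] at hp
  have hwf1 : WFC (if op0 = 'S' then chT else ((d0, op0) :: chT)) := by
    split
    · exact WFC_sub (List.sublist_cons_self _ _) hwf
    · exact hwf
  obtain ⟨chI, hE1⟩ := List.getLast?_eq_some_iff.mp hL1
  obtain ⟨d1, op1⟩ := t1
  rw [hE1] at hp ⊢
  rw [hE1] at hwf1
  obtain ⟨hd1ne, hd1dig, hop1nd⟩ := hwf1 (d1, op1) (by simp)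
  have hwfI : WFC chI := WFC_sub (List.sublist_append_left _ _) hwf1
  have hend1 : PySem.Chars.endswith (render (chI ++ [(d1, op1)])) ['S'] = ('S' == op1) := by
    rw [render_concat]; exact endswith_concat _ op1 'S'
  have htd1 : trailDigitsB (PySem.List.slice (render (chI ++ [(d1, op1)])) none (some (-1))) = d1.length := by
    rw [trail_dropLast]; exact trail_len hwfI hd1dig
  rw [hend1, htd1]
  have hc2 : ((('S' == op1) = true) ∧ 0 < d1.length) ↔ (op1 = 'S') := by
    constructor
    · rintro ⟨h2, -⟩; exact (beq_iff_eq.mp h2).symm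
    · rintro rfl; exact ⟨by simp, List.length_pos_iff.mpr hd1ne⟩
  rw [if_congr hc2 rfl rfl, if_congr hc2 rfl rfl,
      trail_take chI d1 op1, trail_mid chI d1 op1]
  rw [show (if op1 = 'S' then render chI else render (chI ++ [(d1, op1)])) =
      render (if op1 = 'S' then chI else (chI ++ [(d1, op1)])) from (apply_ite render _ _ _).symm]
  rw [List.dropLast_concat] at hp
  -- stage 3 : E2 = (d2, op2) :: chU
  rcases hh2 : (if op1 = 'S' then chI else (chI ++ [(d1, op1)])).head? with _ | t2
  · rw [hh2] at hp; cases hp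
  rw [hh2] at hp
  simp only [] at hp
  have hwf2 : WFC (if op1 = 'S' then chI else (chI ++ [(d1, op1)])) := by
    split
    · exact hwfI
    · exact hwf1
  obtain ⟨chU, hE2⟩ := List.head?_eq_some_iff.mp hh2
  obtain ⟨d2, op2⟩ := t2
  rw [hE2] at hp ⊢
  rw [hE2] at hwf2
  obtain ⟨hd2ne, hd2dig, hop2nd⟩ := hwf2 (d2, op2) List.mem_cons_self
  rw [lead_len hd2dig hop2nd, lead_get op2 chU]
  have hc3 : (0 < d2.length ∧ (some op2 = some 'H')) ↔ (op2 = 'H') := by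
    simp [List.length_pos_iff, hd2ne]
  rw [if_congr hc3 rfl rfl, lead_drop d2 op2 chU]
  rw [show (if op2 = 'H' then render chU else render ((d2, op2) :: chU)) =
      render (if op2 = 'H' then chU else ((d2, op2) :: chU)) from (apply_ite render _ _ _).symm]
  rw [List.tail_cons] at hp
  -- stage 4 : E3 = chJ ++ [(d3, op3)]
  rcases hL3 : (if op2 = 'H' then chU else ((d2, op2) :: chU)).getLast? with _ | t3
  · rw [hL3] at hp; cases hp
  rw [hL3] at hp
  simp only [] at hp
  have hwf3 : WFC (if op2 = 'H' then chU else ((d2, op2) :: chU)) := by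
    split
    · exact WFC_sub (List.sublist_cons_self _ _) hwf2
    · exact hwf2
  obtain ⟨chJ, hE3⟩ := List.getLast?_eq_some_iff.mp hL3
  obtain ⟨d3, op3⟩ := t3
  rw [hE3] at hp ⊢
  rw [hE3] at hwf3
  obtain ⟨hd3ne, hd3dig, hop3nd⟩ := hwf3 (d3, op3) (by simp)
  have hwfJ : WFC chJ := WFC_sub (List.sublist_append_left _ _) hwf3
  have hend3 : PySem.Chars.endswith (render (chJ ++ [(d3, op3)])) ['H'] = ('H' == op3) := by
    rw [render_concat]; exact endswith_concat _ op3 'H'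
  have htd3 : trailDigitsB (PySem.List.slice (render (chJ ++ [(d3, op3)])) none (some (-1))) = d3.length := by
    rw [trail_dropLast]; exact trail_len hwfJ hd3dig
  rw [hend3, htd3]
  have hc4 : ((('H' == op3) = true) ∧ 0 < d3.length) ↔ (op3 = 'H') := by
    constructor
    · rintro ⟨h2, -⟩; exact (beq_iff_eq.mp h2).symm
    · rintro rfl; exact ⟨by simp, List.length_pos_iff.mpr hd3ne⟩
  rw [if_congr hc4 rfl rfl, trail_take chJ d3 op3]
  rw [show (if op3 = 'H' then render chJ else render (chJ ++ [(d3, op3)])) =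
      render (if op3 = 'H' then chJ else (chJ ++ [(d3, op3)])) from (apply_ite render _ _ _).symm]
  rw [List.dropLast_concat] at hp
  simp only [chunkVal] at hp
  injection hp with hp1
  injection hp1 with hpc hps
  rw [hpc, hps]

-- ===== VERDICT (by name: the statement is the Claim_ definition above) =====
theorem trim_clips_spec : Claim_equal_trim_clips := by
  intro cigar seq _hdom hpre
  unfold Spec_trim_clips
  by_cases hsh : (!(PySem.Chars.isIn ['S'] cigar.toList) && !(PySem.Chars.isIn ['H'] cigar.toList)) = true
  · unfold trim_clips trim_clips_alt
    rw [if_pos hsh, if_pos hsh]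
  · rw [Bool.not_eq_true] at hsh
    unfold Pre_trim_clips preB at hpre
    rw [hsh, Bool.false_or] at hpre
    rcases hchm : chunksOf? cigar.toList with _ | ch
    · rw [hchm] at hpre; simp at hpre
    · rw [hchm] at hpre
      simp only [Bool.and_eq_true, List.all_eq_true, Bool.not_eq_true'] at hpre
      obtain ⟨hgood, hbad⟩ := hpre
      obtain ⟨hcs, hwf⟩ := chunksOf?_sound hchm
      have hg : GoodC ch := fun p hp => hgood p hp
      have hne : ch ≠ [] := by
        rintro rfl
        simp only [render, List.map_nil, List.flatten_nil] at hcs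
        rw [Bool.and_eq_false_iff] at hsh
        rcases hsh with h | h <;> rw [Bool.not_eq_false'] at h <;>
          rw [isIn_singleton_iff, hcs] at h <;> simp at h
      have hsome := cpipe_isSome ch seq.toList hne hbad
      obtain ⟨⟨ch', sq'⟩, hp⟩ := Option.isSome_iff_exists.mp hsome
      rw [A_branch2 hwf hg hp cigar seq hcs rfl hsh,
          B_branch2 hwf hg hp cigar seq hcs rfl hsh]
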